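-- pv_equiv track=rewrite | github.com/dramuk/RealTimeSuperResolution | Client/selective_scaling.py | find_send
-- ===== SOURCE A (Python) =====
-- def find_send(x, y, w, h, send_dict, image_dict):
--     rect_point_list = [(x,y),(x+w,y),(x,y+h),(x+w, y+h)]
--     keys = list(image_dict.keys())
--     for i in rect_point_list:
--         for j in keys:
--             if((i[0] > image_dict[j][0][1] and i[0] < image_dict[j][1][1]) and ( i[1] > image_dict[j][0][0] and i[1] < image_dict[j][1][0])) :
--                 send_dict[j] = 1
--     return send_dict
-- ===== SOURCE B (Python) =====
-- def find_send(x, y, w, h, send_dict, image_dict):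
--     # One pass over the rectangles: the four corners of the query rect are the
--     # product {x, x+w} x {y, y+h}, so "some corner lies strictly inside" factors
--     # into one interval test per axis.
--     for j, v in image_dict.items():
--         if ((x > v[0][1] and x < v[1][1]) or (x + w > v[0][1] and x + w < v[1][1])) and \
--            ((y > v[0][0] and y < v[1][0]) or (y + h > v[0][0] and y + h < v[1][0])):
--             send_dict[j] = 1
--     return send_dict
-- ===== Notes on version B (the rewrite author's own statement) =====
-- stated objective: simpler
-- what changed: B replaces A's double loop (four explicit corner points outer, all rectangle keys inner, with repeated dict lookups) by a single pass over image_dict.items() using factored per-axis interval tests ((x or x+w strictly inside the x-bounds) and (y or y+h strictly inside the y-bounds)); Pre_ excludes inputs where a matched rectangle's key is not already present in send_dict, because there the dict-append order of the newly inserted keys is accidental (A appends corner-major, B in image_dict order), and inputs whose association lists carry duplicate keys, which a Python dict cannot hold.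
-- outside the precondition, e.g. on find_send(0, 0, 10, 10, {}, {'a': [[-5, -5], [5, 5]]}): A returns {'a': 1}, B returns {'a': 1}
import Mathlib
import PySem

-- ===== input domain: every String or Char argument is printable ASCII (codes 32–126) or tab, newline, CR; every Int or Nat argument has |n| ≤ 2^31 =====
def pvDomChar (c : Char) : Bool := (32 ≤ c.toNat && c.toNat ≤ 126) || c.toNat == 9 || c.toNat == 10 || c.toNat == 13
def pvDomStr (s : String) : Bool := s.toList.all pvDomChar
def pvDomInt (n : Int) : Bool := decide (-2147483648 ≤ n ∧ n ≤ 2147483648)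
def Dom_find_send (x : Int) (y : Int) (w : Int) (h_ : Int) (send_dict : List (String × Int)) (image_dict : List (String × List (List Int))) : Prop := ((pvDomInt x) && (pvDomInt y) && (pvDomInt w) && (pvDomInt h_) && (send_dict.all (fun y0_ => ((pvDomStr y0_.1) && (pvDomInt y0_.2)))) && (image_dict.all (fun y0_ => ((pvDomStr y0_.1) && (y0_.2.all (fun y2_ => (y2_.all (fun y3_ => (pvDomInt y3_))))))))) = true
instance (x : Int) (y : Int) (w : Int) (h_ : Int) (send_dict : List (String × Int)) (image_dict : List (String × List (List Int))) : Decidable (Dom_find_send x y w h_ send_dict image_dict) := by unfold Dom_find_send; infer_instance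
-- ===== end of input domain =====

-- B replaces A's 4-corner outer loop with inner scan of all rectangles by a single pass over the
-- rectangles with factored per-axis interval tests (objective: simpler).
-- Both Pythons mutate send_dict in place; the equivalence proved is about the returned value.

-- ===== PORT A =====
-- v[i][j] for the literal nonnegative indices used by the code; in range on Pre_, so List.getD is exact here
def pvIdx (v : List (List Int)) (i j : Nat) : Int := (v.getD i []).getD j 0

-- cx strictly inside the open x-interval of v (Python: cx > v[0][1] and cx < v[1][1])
def pvXHit (cx : Int) (v : List (List Int)) : Bool :=
  decide (cx > pvIdx v 0 1) && decide (cx < pvIdx v 1 1)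

-- cy strictly inside the open y-interval of v (Python: cy > v[0][0] and cy < v[1][0])
def pvYHit (cy : Int) (v : List (List Int)) : Bool :=
  decide (cy > pvIdx v 0 0) && decide (cy < pvIdx v 1 0)

-- the if-condition of A, for one corner (cx, cy): Python's ((… and …) and (… and …))
def pvHitA (cx cy : Int) (v : List (List Int)) : Bool := pvXHit cx v && pvYHit cy v

def find_send (x : Int) (y : Int) (w : Int) (h_ : Int) (send_dict : List (String × Int)) (image_dict : List (String × List (List Int))) : List (String × Int) :=
  let rect_point_list : List (Int × Int) := [(x, y), (x + w, y), (x, y + h_), (x + w, y + h_)]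
  let imgd := PySem.Dict.mk image_dict
  let keys := imgd.keys
  (rect_point_list.foldl (fun d i =>
      keys.foldl (fun d j =>
        if pvHitA i.1 i.2 (imgd.getD j []) then d.insert j 1 else d) d)
    (PySem.Dict.mk send_dict)).items

-- ===== PORT B =====
-- the factored if-condition of B: (x or x+w strictly inside) and (y or y+h strictly inside)
def pvHitB (x y w h_ : Int) (v : List (List Int)) : Bool :=
  (pvXHit x v || pvXHit (x + w) v) && (pvYHit y v || pvYHit (y + h_) v)

def find_send_alt (x : Int) (y : Int) (w : Int) (h_ : Int) (send_dict : List (String × Int)) (image_dict : List (String × List (List Int))) : List (String × Int) :=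
  (image_dict.foldl (fun d p => if pvHitB x y w h_ p.2 then d.insert p.1 1 else d)
    (PySem.Dict.mk send_dict)).items

-- ===== PRECONDITION & SPEC =====
-- Prop mirror of the factored corner-containment test, for the precondition
def pvHitPre (x y w h_ : Int) (v : List (List Int)) : Prop :=
  ((x > pvIdx v 0 1 ∧ x < pvIdx v 1 1) ∨ (x + w > pvIdx v 0 1 ∧ x + w < pvIdx v 1 1)) ∧
  ((y > pvIdx v 0 0 ∧ y < pvIdx v 1 0) ∨ (y + h_ > pvIdx v 0 0 ∧ y + h_ < pvIdx v 1 0))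

-- Pre_ excludes (a) duplicate keys in either association list, which a Python dict cannot hold;
-- (b) rectangle values whose rows A indexes out of range, on which A raises IndexError (the row [1]
-- is only touched when some corner's x-coordinate exceeds v[0][1], exactly as A short-circuits);
-- (c) inputs where a matched rectangle's key is missing from send_dict: there the dict-append order
-- of the newly inserted keys is accidental (A appends corner-major, B in image_dict order).
def Pre_find_send (x : Int) (y : Int) (w : Int) (h_ : Int) (send_dict : List (String × Int)) (image_dict : List (String × List (List Int))) : Prop :=
  (send_dict.map Prod.fst).Nodup ∧ (image_dict.map Prod.fst).Nodup ∧
  (∀ p ∈ image_dict, 1 ≤ p.2.length ∧ 2 ≤ (p.2.getD 0 []).length ∧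
    ((x > pvIdx p.2 0 1 ∨ x + w > pvIdx p.2 0 1) → (2 ≤ p.2.length ∧ 2 ≤ (p.2.getD 1 []).length))) ∧
  (∀ p ∈ image_dict, pvHitPre x y w h_ p.2 → p.1 ∈ send_dict.map Prod.fst)
instance (x : Int) (y : Int) (w : Int) (h_ : Int) (send_dict : List (String × Int)) (image_dict : List (String × List (List Int))) : Decidable (Pre_find_send x y w h_ send_dict image_dict) := by unfold Pre_find_send pvHitPre; infer_instance

def pvWitness_find_send : Int × Int × Int × Int × (List (String × Int)) × (List (String × List (List Int))) :=
  (0, 0, 10, 10, [("a", 0)], [("a", [[-5, -5], [20, 20]]), ("b", [[30, 30], [40, 40]])])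

def Spec_find_send (x : Int) (y : Int) (w : Int) (h_ : Int) (send_dict : List (String × Int)) (image_dict : List (String × List (List Int))) (out : List (String × Int)) : Prop := out = find_send_alt x y w h_ send_dict image_dict
instance (x : Int) (y : Int) (w : Int) (h_ : Int) (send_dict : List (String × Int)) (image_dict : List (String × List (List Int))) (out : List (String × Int)) : Decidable (Spec_find_send x y w h_ send_dict image_dict out) := by unfold Spec_find_send; infer_instance

-- ===== CLAIM (what is proved, stated in full; the proofs are below) =====
def Claim_equal_find_send : Prop := ∀ (x : Int) (y : Int) (w : Int) (h_ : Int) (send_dict : List (String × Int)) (image_dict : List (String × List (List Int))), Dom_find_send x y w h_ send_dict image_dict → Pre_find_send x y w h_ send_dict image_dict → Spec_find_send x y w h_ send_dict image_dict (find_send x y w h_ send_dict image_dict)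

-- ===== LEMMAS AND PROOFS =====

-- insert the value 1 at each key of ev in turn
def pvApply (d : PySem.Dict String Int) (ev : List String) : PySem.Dict String Int :=
  ev.foldl (fun d j => d.insert j 1) d

-- set the value of every entry whose key occurs in ev to 1, in place
def pvMark (l : List (String × Int)) (ev : List String) : List (String × Int) :=
  l.map (fun p => if p.1 ∈ ev then (p.1, 1) else p)

-- first occurrences of elements of ev that are not in used, in order
def pvNews : List String → List String → List String
  | [], _ => []
  | a :: l, used => if a ∈ used then pvNews l used else a :: pvNews l (a :: used)

theorem pvApply_append (d : PySem.Dict String Int) (l1 l2 : List String) :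
    pvApply d (l1 ++ l2) = pvApply (pvApply d l1) l2 := by
  simp [pvApply, List.foldl_append]

theorem pvNews_congr (l : List String) : ∀ u u' : List String, (∀ z, z ∈ u ↔ z ∈ u') → pvNews l u = pvNews l u' := by
  induction l with
  | nil => intro u u' h; rfl
  | cons a l ih =>
    intro u u' h
    by_cases ha : a ∈ u
    · rw [pvNews, pvNews, if_pos ha, if_pos ((h a).1 ha)]; exact ih u u' h
    · rw [pvNews, pvNews, if_neg ha, if_neg (fun hx => ha ((h a).2 hx))]
      exact congrArg (a :: ·) (ih _ _ (fun z => by simp [List.mem_cons, h z]))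

-- the central characterisation of a run of value-1 insertions over a dict
theorem pvApply_items (ev : List String) : ∀ d : PySem.Dict String Int,
    (pvApply d ev).items = pvMark d.items ev ++ (pvNews ev d.keys).map (fun j => (j, (1 : Int))) := by
  induction ev with
  | nil => intro d; simp [pvApply, pvMark, pvNews]
  | cons a ev ih =>
    intro d
    have hstep : pvApply d (a :: ev) = pvApply (d.insert a 1) ev := rfl
    by_cases hc : d.contains a = true
    · have hmem : a ∈ d.keys := (PySem.Dict.contains_iff_mem_keys d a).1 hc
      rw [hstep, ih, PySem.Dict.items_insert_of_contains d 1 hc, PySem.Dict.keys_insert_of_contains d 1 hc]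
      have hmark : pvMark (d.items.map (fun p => if p.1 == a then (a, (1:Int)) else p)) ev = pvMark d.items (a :: ev) := by
        simp only [pvMark, List.map_map]
        congr 1
        funext p
        by_cases hpa : p.1 = a
        · simp [Function.comp, hpa]
        · simp [Function.comp, hpa, List.mem_cons]
      rw [hmark]
      have : pvNews (a :: ev) d.keys = pvNews ev d.keys := by rw [pvNews, if_pos hmem]
      rw [this]
    · have hmem : a ∉ d.keys := fun h => hc ((PySem.Dict.contains_iff_mem_keys d a).2 h)
      rw [hstep, ih, PySem.Dict.items_insert_of_not_contains d 1 (by simpa using hc),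
        PySem.Dict.keys_insert_of_not_contains d 1 (by simpa using hc)]
      have hmark1 : pvMark (d.items ++ [(a, (1:Int))]) ev = pvMark d.items ev ++ [(a, (1:Int))] := by
        simp [pvMark]
      have hmark2 : pvMark d.items (a :: ev) = pvMark d.items ev := by
        refine List.map_congr_left (fun p hp => ?_)
        have : p.1 ≠ a := by
          intro h
          exact hmem (h ▸ List.mem_map_of_mem hp)
        simp [List.mem_cons, this]
      have hnews : pvNews (a :: ev) d.keys = a :: pvNews ev (d.keys ++ [a]) := by
        rw [pvNews, if_neg hmem]
        exact congrArg (a :: ·) (pvNews_congr _ _ _ (fun z => by simp [List.mem_cons, List.mem_append, or_comm]))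
      rw [hmark1, hmark2, hnews]
      simp

-- a guarded insertion pass over keys is pvApply of the filtered keys
theorem pvPass (P : String → Bool) (keys : List String) : ∀ d : PySem.Dict String Int,
    keys.foldl (fun d j => if P j then d.insert j 1 else d) d = pvApply d (keys.filter P) := by
  induction keys with
  | nil => intro d; rfl
  | cons a keys ih =>
    intro d
    by_cases hp : P a = true
    · rw [List.foldl_cons, if_pos hp, List.filter_cons_of_pos hp, ih]; rfl
    · rw [List.foldl_cons, if_neg hp, List.filter_cons_of_neg (by simpa using hp), ih]

theorem pvFoldFlat {α : Type} (f : α → List String) (cs : List α) : ∀ d : PySem.Dict String Int,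
    cs.foldl (fun d c => pvApply d (f c)) d = pvApply d (cs.flatMap f) := by
  induction cs with
  | nil => intro d; rfl
  | cons c cs ih => intro d; rw [List.foldl_cons, List.flatMap_cons, pvApply_append, ih]

-- B's single loop over the pairs is pvApply of the keys of the hit pairs
theorem pvPassPairs (x y w h_ : Int) (image : List (String × List (List Int))) :
    ∀ d : PySem.Dict String Int,
      image.foldl (fun d p => if pvHitB x y w h_ p.2 then d.insert p.1 1 else d) d =
        pvApply d ((image.filter (fun p => pvHitB x y w h_ p.2)).map Prod.fst) := by
  induction image with
  | nil => intro d; rfl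
  | cons p rest ih =>
    intro d
    by_cases hp : pvHitB x y w h_ p.2 = true
    · rw [List.foldl_cons, if_pos hp]
      simp only [List.filter_cons, hp, if_true, List.map_cons]
      rw [ih]; rfl
    · rw [List.foldl_cons, if_neg hp]
      simp only [List.filter_cons, hp, Bool.false_eq_true, if_false]
      rw [ih]

-- A's corner list and the per-corner hit sublist of image keys (as pairs)
def pvCorners (x y w h_ : Int) : List (Int × Int) := [(x, y), (x + w, y), (x, y + h_), (x + w, y + h_)]

def pvG (c : Int × Int) (image : List (String × List (List Int))) : List String :=
  (image.filter (fun p => pvHitA c.1 c.2 p.2)).map Prod.fst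

def pvEvA (x y w h_ : Int) (image : List (String × List (List Int))) : List String :=
  (pvCorners x y w h_).flatMap (fun c => pvG c image)

def pvEvB (x y w h_ : Int) (image : List (String × List (List Int))) : List String :=
  (image.filter (fun p => pvHitB x y w h_ p.2)).map Prod.fst

theorem pvLookup_eq (image : List (String × List (List Int))) (hnd : (image.map Prod.fst).Nodup)
    (p : String × List (List Int)) (hp : p ∈ image) :
    (PySem.Dict.mk image).getD p.1 [] = p.2 := by
  refine PySem.Dict.getD_of_mem_items (d := PySem.Dict.mk image) ?_ ?_ []
  · exact hp
  · simpa [PySem.Dict.keys_mk] using hnd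

theorem pvG_eq (image : List (String × List (List Int))) (hnd : (image.map Prod.fst).Nodup) (c : Int × Int) :
    (image.map Prod.fst).filter (fun j => pvHitA c.1 c.2 ((PySem.Dict.mk image).getD j [])) = pvG c image := by
  rw [List.filter_map, pvG]
  refine congrArg _ (List.filter_congr (fun p hp => ?_))
  simp [Function.comp, pvLookup_eq image hnd p hp]

theorem find_send_char (x y w h_ : Int) (sd : List (String × Int)) (image : List (String × List (List Int)))
    (hnd : (image.map Prod.fst).Nodup) :
    find_send x y w h_ sd image =
      pvMark sd (pvEvA x y w h_ image) ++
        (pvNews (pvEvA x y w h_ image) (sd.map Prod.fst)).map (fun j => (j, (1 : Int))) := by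
  unfold find_send
  simp only [pvPass, PySem.Dict.keys_mk]
  simp only [pvG_eq image hnd]
  rw [show [(x, y), (x + w, y), (x, y + h_), (x + w, y + h_)] = pvCorners x y w h_ from rfl]
  rw [pvFoldFlat, pvApply_items]
  rfl

theorem find_send_alt_char (x y w h_ : Int) (sd : List (String × Int)) (image : List (String × List (List Int))) :
    find_send_alt x y w h_ sd image =
      pvMark sd (pvEvB x y w h_ image) ++
        (pvNews (pvEvB x y w h_ image) (sd.map Prod.fst)).map (fun j => (j, (1 : Int))) := by
  unfold find_send_alt
  rw [pvPassPairs, pvApply_items]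
  rfl

-- the product of the four corner tests factors into one test per axis
theorem pvDistrib : ∀ A B C D : Bool, ((A && B) || ((C && B) || ((A && D) || (C && D)))) = ((A || C) && (B || D)) := by decide

theorem pvHit_or (x y w h_ : Int) (v : List (List Int)) :
    (pvHitA x y v || (pvHitA (x + w) y v || (pvHitA x (y + h_) v || pvHitA (x + w) (y + h_) v))) = pvHitB x y w h_ v :=
  pvDistrib (pvXHit x v) (pvYHit y v) (pvXHit (x + w) v) (pvYHit (y + h_) v)

theorem pvHitPre_iff (x y w h_ : Int) (v : List (List Int)) :
    pvHitPre x y w h_ v ↔ pvHitB x y w h_ v = true := by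
  simp [pvHitPre, pvHitB, pvXHit, pvYHit]

theorem pvMem_evA (x y w h_ : Int) (image : List (String × List (List Int))) (z : String) :
    z ∈ pvEvA x y w h_ image ↔ ∃ p ∈ image, p.1 = z ∧ pvHitB x y w h_ p.2 = true := by
  simp only [pvEvA, pvCorners, List.flatMap_cons, List.flatMap_nil, List.append_nil,
    List.mem_append, pvG, List.mem_map, List.mem_filter]
  constructor
  · rintro (⟨p, ⟨hp, h⟩, rfl⟩ | ⟨p, ⟨hp, h⟩, rfl⟩ | ⟨p, ⟨hp, h⟩, rfl⟩ | ⟨p, ⟨hp, h⟩, rfl⟩) <;>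
      refine ⟨p, hp, rfl, ?_⟩ <;> rw [← pvHit_or] <;> simp [h]
  · rintro ⟨p, hp, rfl, h⟩
    rw [← pvHit_or] at h
    simp only [Bool.or_eq_true] at h
    rcases h with h | h | h | h
    · exact Or.inl ⟨p, ⟨hp, h⟩, rfl⟩
    · exact Or.inr (Or.inl ⟨p, ⟨hp, h⟩, rfl⟩)
    · exact Or.inr (Or.inr (Or.inl ⟨p, ⟨hp, h⟩, rfl⟩))
    · exact Or.inr (Or.inr (Or.inr ⟨p, ⟨hp, h⟩, rfl⟩))

theorem pvMem_evB (x y w h_ : Int) (image : List (String × List (List Int))) (z : String) :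
    z ∈ pvEvB x y w h_ image ↔ ∃ p ∈ image, p.1 = z ∧ pvHitB x y w h_ p.2 = true := by
  simp only [pvEvB, List.mem_map, List.mem_filter]
  constructor
  · rintro ⟨p, ⟨hp, h⟩, rfl⟩; exact ⟨p, hp, rfl, h⟩
  · rintro ⟨p, hp, rfl, h⟩; exact ⟨p, ⟨hp, h⟩, rfl⟩

theorem pvNews_nil_of_subset (l : List String) : ∀ u, (∀ z ∈ l, z ∈ u) → pvNews l u = [] := by
  induction l with
  | nil => intro u _; rfl
  | cons a l ih =>
    intro u h
    rw [pvNews, if_pos (h a (List.mem_cons_self))]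
    exact ih u (fun z hz => h z (List.mem_cons_of_mem a hz))

theorem find_send_spec : Claim_equal_find_send := by
  intro x y w h_ sd image _ hpre
  obtain ⟨-, hnd, -, hsub⟩ := hpre
  unfold Spec_find_send
  rw [find_send_char x y w h_ sd image hnd, find_send_alt_char x y w h_ sd image]
  have hkeys : ∀ z, (∃ p ∈ image, p.1 = z ∧ pvHitB x y w h_ p.2 = true) → z ∈ sd.map Prod.fst := by
    rintro z ⟨p, hp, rfl, h⟩
    exact hsub p hp ((pvHitPre_iff x y w h_ p.2).2 h)
  rw [pvNews_nil_of_subset _ _ (fun z hz => hkeys z ((pvMem_evA x y w h_ image z).1 hz)),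
    pvNews_nil_of_subset _ _ (fun z hz => hkeys z ((pvMem_evB x y w h_ image z).1 hz))]
  have hmark : pvMark sd (pvEvA x y w h_ image) = pvMark sd (pvEvB x y w h_ image) := by
    refine List.map_congr_left (fun p hp => ?_)
    have hiff : p.1 ∈ pvEvA x y w h_ image ↔ p.1 ∈ pvEvB x y w h_ image :=
      (pvMem_evA x y w h_ image p.1).trans (pvMem_evB x y w h_ image p.1).symm
    by_cases h : p.1 ∈ pvEvA x y w h_ image
    · rw [if_pos h, if_pos (hiff.1 h)]
    · rw [if_neg h, if_neg (fun hx => h (hiff.2 hx))]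
  rw [hmark]
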